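-- pv_equiv track=rewrite | github.com/ywfan617/python- | 例题/三位数组成问题.py | count_three_digit
-- ===== SOURCE A (Python) =====
-- def count_three_digit(list1):
--     len1=len(list1)
--     count=0
--     numberlist=list()
--     for i in range(len1):
--         for j in range(len1):
--             for k in range(len1):
--                 if list1[i]!=0 and i!=j and j!=k and i!=k:
--                     count+=1
--                     number=list1[i]*100+list1[j]*10+list1[k]
--                     numberlist.append(number)
--     return count,numberlist
-- ===== SOURCE B (Python) =====
-- def count_three_digit(list1):
--     n = len(list1)
--     count = sum(1 for x in list1 if x != 0) * (n - 1) * (n - 2)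
--     numberlist = []
--     for i in range(n):
--         if list1[i] != 0:
--             for p in two_digit_suffixes(list1[:i] + list1[i + 1:]):
--                 numberlist.append(list1[i] * 100 + p)
--     return count, numberlist
--
--
-- def two_digit_suffixes(rem):
--     # all two-digit numbers rem[t]*10+c with c drawn from rem with position t removed
--     res = []
--     for t in range(len(rem)):
--         for c in rem[:t] + rem[t + 1:]:
--             res.append(rem[t] * 10 + c)
--     return res
-- ===== Notes on version B (the rewrite author's own statement) =====
-- stated objective: alternative
-- what changed: B replaces A's triple nested index loops with i!=j/j!=k/i!=k guards and a running counter by a removal-based construction (pick the hundreds element, delete it by slicing, build two-digit suffixes from the remainder the same way) and computes the count by the closed form (#nonzero)*(n-1)*(n-2) instead of counting inside the loop.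
import Mathlib
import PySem

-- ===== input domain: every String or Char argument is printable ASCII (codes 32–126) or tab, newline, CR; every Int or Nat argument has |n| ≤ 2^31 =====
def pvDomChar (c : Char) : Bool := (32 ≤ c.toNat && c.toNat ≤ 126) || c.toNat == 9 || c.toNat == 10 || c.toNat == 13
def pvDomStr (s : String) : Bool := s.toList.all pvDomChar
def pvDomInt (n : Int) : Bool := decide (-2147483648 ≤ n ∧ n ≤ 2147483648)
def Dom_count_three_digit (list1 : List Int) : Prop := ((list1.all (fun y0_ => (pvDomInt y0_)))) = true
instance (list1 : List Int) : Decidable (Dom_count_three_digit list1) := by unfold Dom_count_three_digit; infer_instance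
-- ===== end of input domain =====

-- B builds the numbers by removal (pick the hundreds element, slice it out, form two-digit
-- suffixes from the remainder the same way) and computes the count by the closed form
-- (#nonzero)*(n-1)*(n-2), instead of A's triple nested index loops with distinctness guards.

-- ===== PORT A =====
-- A's triple nested `for … in range(len1)` loops, threading (count, numberlist) through them.
def count_three_digit (list1 : List Int) : Int × List Int :=
  let len1 := list1.length
  (List.range len1).foldl (fun acc i =>
    (List.range len1).foldl (fun acc j =>
      (List.range len1).foldl (fun acc k =>
        if list1.getD i 0 ≠ 0 ∧ i ≠ j ∧ j ≠ k ∧ i ≠ k then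
          (acc.1 + 1, acc.2 ++ [list1.getD i 0 * 100 + list1.getD j 0 * 10 + list1.getD k 0])
        else acc) acc) acc) ((0 : Int), ([] : List Int))

-- ===== PORT B =====
-- Source B's helper: for t in range(len(rem)): for c in rem[:t]+rem[t+1:]: append rem[t]*10+c.
-- (the slices rem[:t], rem[t+1:] with 0 ≤ t < len are exactly take/drop.)
def two_digit_suffixes (rem : List Int) : List Int :=
  (List.range rem.length).flatMap fun t =>
    (rem.take t ++ rem.drop (t + 1)).map fun c => rem.getD t 0 * 10 + c

def count_three_digit_alt (list1 : List Int) : Int × List Int :=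
  let n := list1.length
  let count : Int := ((list1.filter fun x => x ≠ 0).length : Int) * ((n : Int) - 1) * ((n : Int) - 2)
  let numberlist := (List.range n).flatMap fun i =>
    if list1.getD i 0 ≠ 0 then
      (two_digit_suffixes (list1.take i ++ list1.drop (i + 1))).map fun p => list1.getD i 0 * 100 + p
    else []
  (count, numberlist)

-- ===== PRECONDITION & SPEC =====
def Spec_count_three_digit (list1 : List Int) (out : Int × List Int) : Prop := out = count_three_digit_alt list1
instance (list1 : List Int) (out : Int × List Int) : Decidable (Spec_count_three_digit list1 out) := by unfold Spec_count_three_digit; infer_instance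

-- ===== CLAIM (what is proved, stated in full; the proofs are below) =====
def Claim_equal_count_three_digit : Prop := ∀ (list1 : List Int), Dom_count_three_digit list1 → Spec_count_three_digit list1 (count_three_digit list1)

-- ===== LEMMAS AND PROOFS =====

-- Folding "if p then (count+1, acc ++ [f t]) else acc" collects the filterMap, count = length.
theorem foldl_collect {α β : Type} (p : α → Prop) [DecidablePred p] (f : α → β)
    (ts : List α) (c : Int) (ys : List β) :
    ts.foldl (fun acc t => if p t then (acc.1 + 1, acc.2 ++ [f t]) else acc) (c, ys)
      = (c + ((ts.filterMap fun t => if p t then some (f t) else none).length : Int),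
         ys ++ ts.filterMap fun t => if p t then some (f t) else none) := by
  induction ts generalizing c ys with
  | nil => simp
  | cons hd tl ih =>
    by_cases h : p hd
    · simp [h, ih]; ring
    · simp [h, ih]

def cube (n : Nat) : List (Nat × Nat × Nat) :=
  (List.range n).flatMap fun i =>
    (List.range n).flatMap fun j =>
      (List.range n).map fun k => (i, j, k)

theorem count_three_digit_as_cube (list1 : List Int) :
    count_three_digit list1 =
      (cube list1.length).foldl (fun acc t =>
        if list1.getD t.1 0 ≠ 0 ∧ t.1 ≠ t.2.1 ∧ t.2.1 ≠ t.2.2 ∧ t.1 ≠ t.2.2 then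
          (acc.1 + 1, acc.2 ++ [list1.getD t.1 0 * 100 + list1.getD t.2.1 0 * 10 + list1.getD t.2.2 0])
        else acc) ((0 : Int), ([] : List Int)) := by
  simp [count_three_digit, cube, List.foldl_flatMap, List.foldl_map]

-- A's collected list, reshaped into nested flatMaps with index-exclusion branches.
theorem listA_reshape (xs : List Int) :
    ((cube xs.length).filterMap fun t =>
        if xs.getD t.1 0 ≠ 0 ∧ t.1 ≠ t.2.1 ∧ t.2.1 ≠ t.2.2 ∧ t.1 ≠ t.2.2 then
          some (xs.getD t.1 0 * 100 + xs.getD t.2.1 0 * 10 + xs.getD t.2.2 0)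
        else none)
    = (List.range xs.length).flatMap fun i =>
        if xs.getD i 0 ≠ 0 then
          (List.range xs.length).flatMap fun j =>
            if j = i then [] else
              (List.range xs.length).flatMap fun k =>
                if k = i then [] else if k = j then [] else
                  [xs.getD i 0 * 100 + xs.getD j 0 * 10 + xs.getD k 0]
        else [] := by
  unfold cube
  simp only [List.filterMap_flatMap, List.filterMap_map]
  refine List.flatMap_congr fun i _ => ?_
  by_cases hi : xs.getD i 0 ≠ 0
  · rw [if_pos hi]
    refine List.flatMap_congr fun j _ => ?_
    by_cases hj : j = i
    · subst hj; simp
    · rw [if_neg hj, List.filterMap_eq_flatMap_toList]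
      refine List.flatMap_congr fun k _ => ?_
      by_cases hk : k = i
      · subst hk; simp [Ne.symm hj]
      · by_cases hk2 : k = j
        · subst hk2; simp [hk]
        · simp only [Function.comp, Option.toList]
          rw [if_pos ⟨hi, Ne.symm hj, fun h => hk2 h.symm, fun h => hk h.symm⟩]
          simp [hk, hk2]
  · rw [if_neg hi]
    rw [ne_eq, not_not] at hi
    rw [List.flatMap_eq_nil_iff]
    intro j _
    rw [List.filterMap_eq_nil_iff]
    intro k _
    rw [List.getD_eq_getElem?_getD] at hi
    simp [Function.comp, hi]

-- every list is the getD image of its index range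
theorem map_range_getD {α : Type} (d : α) (xs : List α) :
    (List.range xs.length).map (fun t => xs.getD t d) = xs := by
  apply List.ext_getElem
  · simp
  · intro n h1 h2
    simp [List.getD_eq_getElem?_getD, h2]

-- excluding one index from a range loop = looping over the index range of eraseIdx
theorem key {α β : Type} (d : α) (xs : List α) (i : Nat) (hi : i < xs.length) (g : Nat → α → List β) :
    (List.range xs.length).flatMap (fun j => if j = i then [] else g j (xs.getD j d))
    = (List.range (xs.eraseIdx i).length).flatMap
        (fun t => g (if t < i then t else t + 1) ((xs.eraseIdx i).getD t d)) := by
  induction xs generalizing i g with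
  | nil => simp at hi
  | cons x tl ih =>
    match i with
    | 0 =>
      simp [List.range_succ_eq_map, List.flatMap_map]
    | (m+1) =>
      have hm : m < tl.length := by simpa using hi
      have h1 := ih m hm (fun t b => g (t + 1) b)
      simp only [List.length_cons, List.range_succ_eq_map, List.flatMap_cons, List.flatMap_map,
        List.eraseIdx_cons_succ, List.getD_cons_succ, List.getD_cons_zero] at *
      refine congrArg₂ _ (by simp) ?_
      rw [show (fun t => if t + 1 = m + 1 then ([] : List β) else g (t+1) (tl.getD t d))
            = (fun t => if t = m then ([] : List β) else g (t+1) (tl.getD t d)) from by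
            funext t; simp]
      rw [h1]
      refine List.flatMap_congr fun t _ => ?_
      have h2 : (if t < m then t else t + 1) + 1 = if t + 1 < m + 1 then t + 1 else t + 1 + 1 := by
        split_ifs <;> omega
      rw [← h2]

theorem emb_inj (i s t : Nat) :
    ((if s < i then s else s + 1) = (if t < i then t else t + 1)) ↔ s = t := by
  split_ifs <;> omega

-- per-hundreds-index equality of A's inner double loop with B's removal construction
theorem inner_eq (xs : List Int) (i : Nat) (hi : i < xs.length) :
    ((List.range xs.length).flatMap fun j =>
        if j = i then [] else
          (List.range xs.length).flatMap fun k =>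
            if k = i then [] else if k = j then [] else
              [xs.getD i 0 * 100 + xs.getD j 0 * 10 + xs.getD k 0])
    = (two_digit_suffixes (xs.eraseIdx i)).map fun p => xs.getD i 0 * 100 + p := by
  rw [key 0 xs i hi (fun j b =>
        (List.range xs.length).flatMap fun k =>
          if k = i then [] else if k = j then [] else
            [xs.getD i 0 * 100 + b * 10 + xs.getD k 0])]
  unfold two_digit_suffixes
  rw [List.map_flatMap]
  refine List.flatMap_congr fun t ht => ?_
  have ht' : t < (xs.eraseIdx i).length := List.mem_range.mp ht
  rw [key 0 xs i hi (fun k b =>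
        if k = (if t < i then t else t + 1) then [] else
          [xs.getD i 0 * 100 + (xs.eraseIdx i).getD t 0 * 10 + b])]
  rw [show (fun s => if (if s < i then s else s + 1) = (if t < i then t else t + 1)
            then ([] : List Int)
            else [xs.getD i 0 * 100 + (xs.eraseIdx i).getD t 0 * 10 + (xs.eraseIdx i).getD s 0])
        = (fun s => if s = t then ([] : List Int)
            else [xs.getD i 0 * 100 + (xs.eraseIdx i).getD t 0 * 10 + (xs.eraseIdx i).getD s 0]) from by
        funext s; simp [emb_inj]]
  rw [key 0 (xs.eraseIdx i) t ht' (fun _ b =>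
        [xs.getD i 0 * 100 + (xs.eraseIdx i).getD t 0 * 10 + b])]
  rw [← List.eraseIdx_eq_take_drop_succ, List.map_map]
  rw [show ((fun p => xs.getD i 0 * 100 + p) ∘ fun c => (xs.eraseIdx i).getD t 0 * 10 + c)
        = (fun c => xs.getD i 0 * 100 + (xs.eraseIdx i).getD t 0 * 10 + c) from by
        funext c; simp [Function.comp]; ring]
  conv_rhs => rw [← map_range_getD (0 : Int) ((xs.eraseIdx i).eraseIdx t)]
  rw [List.map_map, ← List.map_eq_flatMap]
  rfl

-- the two collected lists agree
theorem lists_eq (xs : List Int) :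
    ((cube xs.length).filterMap fun t =>
        if xs.getD t.1 0 ≠ 0 ∧ t.1 ≠ t.2.1 ∧ t.2.1 ≠ t.2.2 ∧ t.1 ≠ t.2.2 then
          some (xs.getD t.1 0 * 100 + xs.getD t.2.1 0 * 10 + xs.getD t.2.2 0)
        else none)
    = (List.range xs.length).flatMap fun i =>
        if xs.getD i 0 ≠ 0 then
          (two_digit_suffixes (xs.take i ++ xs.drop (i + 1))).map fun p => xs.getD i 0 * 100 + p
        else [] := by
  rw [listA_reshape]
  refine List.flatMap_congr fun i hmem => ?_
  have hi : i < xs.length := List.mem_range.mp hmem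
  by_cases h : xs.getD i 0 ≠ 0
  · rw [if_pos h, if_pos h, ← List.eraseIdx_eq_take_drop_succ, inner_eq xs i hi]
  · rw [if_neg h, if_neg h]

-- length of B's list
theorem sum_if_const {α : Type} (p : α → Prop) [DecidablePred p] (c : Nat) (l : List α) :
    (l.map fun i => if p i then c else 0).sum = l.countP (fun i => decide (p i)) * c := by
  induction l with
  | nil => simp
  | cons hd tl ih =>
    by_cases h : p hd
    · simp [h, ih, Nat.add_mul]; ring
    · simp [h, ih]

theorem two_digit_suffixes_length (rem : List Int) :
    (two_digit_suffixes rem).length = rem.length * (rem.length - 1) := by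
  unfold two_digit_suffixes
  rw [List.length_flatMap]
  have h : ∀ t ∈ List.range rem.length,
      ((rem.take t ++ rem.drop (t + 1)).map fun c => rem.getD t 0 * 10 + c).length
        = rem.length - 1 := by
    intro t ht
    have := List.mem_range.mp ht
    simp [List.length_take, List.length_drop]
    omega
  rw [List.map_congr_left h]
  simp

theorem listB_length (xs : List Int) :
    ((List.range xs.length).flatMap fun i =>
        if xs.getD i 0 ≠ 0 then
          (two_digit_suffixes (xs.take i ++ xs.drop (i + 1))).map fun p => xs.getD i 0 * 100 + p
        else []).length
    = (xs.filter fun x => x ≠ 0).length * ((xs.length - 1) * (xs.length - 2)) := by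
  rw [List.length_flatMap]
  have h1 : ∀ i ∈ List.range xs.length,
      ((if xs.getD i 0 ≠ 0 then
          (two_digit_suffixes (xs.take i ++ xs.drop (i + 1))).map fun p => xs.getD i 0 * 100 + p
        else []).length)
      = (if xs.getD i 0 ≠ 0 then (xs.length - 1) * (xs.length - 2) else 0) := by
    intro i hmem
    have hi : i < xs.length := List.mem_range.mp hmem
    by_cases h : xs.getD i 0 ≠ 0
    · rw [if_pos h, if_pos h, List.length_map, two_digit_suffixes_length]
      have hl : (xs.take i ++ xs.drop (i + 1)).length = xs.length - 1 := by
        simp [List.length_take, List.length_drop]; omega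
      rw [hl]
      congr 1
    · rw [if_neg h, if_neg h]
      rfl
  rw [List.map_congr_left h1, sum_if_const]
  congr 1
  have h := List.countP_map (p := fun b : Int => decide (b ≠ 0)) (f := fun t => xs.getD t 0)
      (l := List.range xs.length)
  rw [map_range_getD] at h
  rw [List.countP_eq_length_filter] at h
  simpa [Function.comp] using h.symm

theorem count_cast (k n : Nat) (hk : k ≤ n) :
    ((k * ((n - 1) * (n - 2)) : Nat) : Int) = (k : Int) * ((n : Int) - 1) * ((n : Int) - 2) := by
  match n with
  | 0 =>
    have hz : k = 0 := by omega
    simp [hz]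
  | 1 =>
    norm_num
  | (m+2) =>
    push_cast
    ring

-- ===== VERDICT (by name: the statement is the Claim_ definition above) =====
theorem count_three_digit_spec : Claim_equal_count_three_digit := by
  intro xs _
  unfold Spec_count_three_digit
  show count_three_digit xs = count_three_digit_alt xs
  rw [count_three_digit_as_cube, foldl_collect]
  unfold count_three_digit_alt
  refine Prod.ext ?_ ?_
  · show (0 : Int) + _ = _
    rw [lists_eq, listB_length, count_cast _ _ (List.length_filter_le _ _)]
    ring
  · show [] ++ _ = _
    rw [List.nil_append, lists_eq]
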